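-- pv_equiv track=rewrite | github.com/aeyobd/surp | plotting/data.py | cat_eq
-- ===== SOURCE A (Python) =====
-- def cat_eq(arr1, arr2):
--     cat1 = {}
--     cat2 = {}
--
--     for v1, v2 in zip(arr1, arr2):
--         if v1 not in cat1.keys():
--             n1 = len(cat1.keys())
--             cat1[v1] = n1
--         else:
--             n1 = cat1[v1]
--
--         if v2 not in cat2.keys():
--             n2 = len(cat2.keys())
--             cat2[v2] = n2
--         else:
--             n2 = cat2[v2]
--
--         if n1 != n2:
--             return False
--
--     return True
-- ===== SOURCE B (Python) =====
-- def cat_eq(arr1, arr2):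
--     fwd = {}
--     seen2 = set()
--     for v1, v2 in zip(arr1, arr2):
--         if v1 in fwd:
--             if fwd[v1] != v2:
--                 return False
--         else:
--             if v2 in seen2:
--                 return False
--             fwd[v1] = v2
--             seen2.add(v2)
--     return True
-- ===== Notes on version B (the rewrite author's own statement) =====
-- stated objective: idiomatic
-- what changed: Replaces A's two first-appearance numeric-code dictionaries (compare the codes each step) by the standard isomorphic-sequences check: one forward map v1->v2 plus a set of already-paired v2 values, rejecting on a mapping conflict or a reused target.
import Mathlib
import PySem

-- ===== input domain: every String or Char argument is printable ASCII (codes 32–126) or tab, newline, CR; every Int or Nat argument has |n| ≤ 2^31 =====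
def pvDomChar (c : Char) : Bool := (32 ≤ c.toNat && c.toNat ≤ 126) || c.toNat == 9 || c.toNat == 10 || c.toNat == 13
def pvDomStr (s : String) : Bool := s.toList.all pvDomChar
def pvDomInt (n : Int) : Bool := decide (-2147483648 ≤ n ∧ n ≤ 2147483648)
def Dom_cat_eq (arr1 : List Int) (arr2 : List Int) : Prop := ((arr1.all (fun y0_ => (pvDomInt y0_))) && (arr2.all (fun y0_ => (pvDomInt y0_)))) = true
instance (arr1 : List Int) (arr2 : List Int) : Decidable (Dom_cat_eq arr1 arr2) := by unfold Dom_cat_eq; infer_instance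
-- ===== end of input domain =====

-- B replaces A's two first-appearance numeric-code dictionaries by the standard isomorphism
-- check (one forward map plus a seen-set of second components); objective: idiomatic, same cost.

-- ===== PORT A =====
-- the for-loop of A over zip(arr1, arr2), carrying the two code dicts cat1, cat2
def catEqLoopA : List (Int × Int) → PySem.Dict Int Int → PySem.Dict Int Int → Bool
  | [], _cat1, _cat2 => true
  | (v1, v2) :: rest, cat1, cat2 =>
    -- 'if v1 not in cat1.keys(): n1 = len(cat1.keys()); cat1[v1] = n1 else: n1 = cat1[v1]'
    let p1 : Int × PySem.Dict Int Int :=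
      if !(cat1.keys.contains v1) then
        ((cat1.keys.length : Int), cat1.insert v1 (cat1.keys.length : Int))
      else ((cat1.get? v1).getD 0, cat1)   -- key present, so get? is some: exact for cat1[v1]
    let p2 : Int × PySem.Dict Int Int :=
      if !(cat2.keys.contains v2) then
        ((cat2.keys.length : Int), cat2.insert v2 (cat2.keys.length : Int))
      else ((cat2.get? v2).getD 0, cat2)
    if p1.1 ≠ p2.1 then false
    else catEqLoopA rest p1.2 p2.2

def cat_eq (arr1 : List Int) (arr2 : List Int) : Bool :=
  catEqLoopA (arr1.zip arr2) PySem.Dict.empty PySem.Dict.empty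

-- ===== PORT B =====
-- the for-loop of B over zip(arr1, arr2), carrying fwd (v1 -> v2) and the set seen2
def catEqLoopB : List (Int × Int) → PySem.Dict Int Int → PySem.Set Int → Bool
  | [], _fwd, _seen2 => true
  | (v1, v2) :: rest, fwd, seen2 =>
    if fwd.contains v1 then
      if (fwd.get? v1).getD 0 ≠ v2 then false   -- key present, so get? is some: exact for fwd[v1]
      else catEqLoopB rest fwd seen2
    else if seen2.contains v2 then false
    else catEqLoopB rest (fwd.insert v1 v2) (seen2.add v2)

def cat_eq_alt (arr1 : List Int) (arr2 : List Int) : Bool :=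
  catEqLoopB (arr1.zip arr2) PySem.Dict.empty PySem.Set.empty

-- ===== PRECONDITION & SPEC =====
def Spec_cat_eq (arr1 : List Int) (arr2 : List Int) (out : Bool) : Prop := out = cat_eq_alt arr1 arr2
instance (arr1 : List Int) (arr2 : List Int) (out : Bool) : Decidable (Spec_cat_eq arr1 arr2 out) := by unfold Spec_cat_eq; infer_instance

-- ===== CLAIM (what is proved, stated in full; the proofs are below) =====
def Claim_equal_cat_eq : Prop := ∀ (arr1 : List Int) (arr2 : List Int), Dom_cat_eq arr1 arr2 → Spec_cat_eq arr1 arr2 (cat_eq arr1 arr2)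

-- ===== LEMMAS AND PROOFS =====

-- A's code dict after the distinct values `xs` have been seen, codes starting at `off`
def codesFrom (xs : List Int) (off : Nat) : PySem.Dict Int Int :=
  PySem.Dict.mk ((xs.zipIdx off).map (fun p => (p.1, (p.2 : Int))))

lemma keys_codesFrom (xs : List Int) (off : Nat) : (codesFrom xs off).keys = xs := by
  simp [codesFrom, PySem.Dict.keys]
  exact List.zipIdx_map_fst off xs

lemma get?_codesFrom (xs : List Int) (off : Nat) (v : Int) (hv : v ∈ xs) :
    (codesFrom xs off).get? v = some ((off + xs.idxOf v : Nat) : Int) := by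
  induction xs generalizing off with
  | nil => cases hv
  | cons a t ih =>
    simp only [codesFrom, List.zipIdx_cons, List.map_cons, PySem.Dict.get?_mk_cons]
    by_cases h : a = v
    · simp [h, List.idxOf_cons_self]
    · have hvt : v ∈ t := (List.mem_cons.mp hv).resolve_left (fun h' => h h'.symm)
      have := ih hvt (off := off + 1)
      simp only [codesFrom] at this
      simp [h, this, List.idxOf_cons_ne _ h]
      omega

lemma codesFrom_append_singleton (xs : List Int) (v : Int) (hv : v ∉ xs) :
    (codesFrom xs 0).insert v (xs.length : Int) = codesFrom (xs ++ [v]) 0 := by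
  have hnc : (codesFrom xs 0).contains v = false := by
    rw [PySem.Dict.contains_eq_decide_mem_keys, keys_codesFrom]
    simpa using hv
  apply PySem.Dict.ext
  rw [PySem.Dict.items_insert_of_not_contains _ _ hnc]
  simp [codesFrom, List.zipIdx_append]

-- B's fwd dict: lookup in the zip of the two seen-lists returns the partner of the FIRST match
lemma get?_zipDict (as bs : List Int) (v : Int) (h : as.length = bs.length) (hv : v ∈ as) :
    (PySem.Dict.mk (as.zip bs)).get? v = bs[as.idxOf v]? := by
  induction as generalizing bs with
  | nil => cases hv
  | cons a t ih =>
    cases bs with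
    | nil => simp at h
    | cons b u =>
      simp only [List.zip_cons_cons, PySem.Dict.get?_mk_cons]
      by_cases hav : a = v
      · simp [hav, List.idxOf_cons_self]
      · have hvt : v ∈ t := (List.mem_cons.mp hv).resolve_left (fun h' => hav h'.symm)
        simp [hav, List.idxOf_cons_ne _ hav, ih u (by simpa using h) hvt]

lemma keys_zipDict (as bs : List Int) (h : as.length = bs.length) :
    (PySem.Dict.mk (as.zip bs)).keys = as := by
  simp only [PySem.Dict.keys]
  exact List.map_fst_zip (le_of_eq h)

-- main loop invariant: A's two code dicts vs B's bijection state, over the same remaining pairs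
lemma loopA_eq_loopB (ps : List (Int × Int)) : ∀ (as bs : List Int), as.Nodup → bs.Nodup →
    as.length = bs.length →
    catEqLoopA ps (codesFrom as 0) (codesFrom bs 0) =
      catEqLoopB ps (PySem.Dict.mk (as.zip bs)) bs := by
  induction ps with
  | nil => intro as bs _ _ _; rfl
  | cons p rest ih =>
    intro as bs hna hnb hlen
    obtain ⟨v1, v2⟩ := p
    have hk1 : (codesFrom as 0).keys = as := keys_codesFrom as 0
    have hk2 : (codesFrom bs 0).keys = bs := keys_codesFrom bs 0
    have hfc : (PySem.Dict.mk (as.zip bs)).contains v1 = decide (v1 ∈ as) := by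
      rw [PySem.Dict.contains_eq_decide_mem_keys, keys_zipDict as bs hlen]
    by_cases h1 : v1 ∈ as
    · have hi1 : as.idxOf v1 < as.length := List.idxOf_lt_length_of_mem h1
      have hg1 := get?_codesFrom as 0 v1 h1
      have hfwd : (PySem.Dict.mk (as.zip bs)).get? v1 = some bs[as.idxOf v1] := by
        rw [get?_zipDict as bs v1 hlen h1, List.getElem?_eq_getElem (by omega)]
      by_cases h2 : v2 ∈ bs
      · -- both seen: A compares codes; B compares the stored partner
        have hi2 : bs.idxOf v2 < bs.length := List.idxOf_lt_length_of_mem h2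
        have hg2 := get?_codesFrom bs 0 v2 h2
        have hiff : bs[as.idxOf v1] = v2 ↔ as.idxOf v1 = bs.idxOf v2 := by
          constructor
          · intro he
            have h' : bs[as.idxOf v1]'(by omega) = bs[bs.idxOf v2]'hi2 := by
              rw [he, List.getElem_idxOf hi2]
            exact (List.Nodup.getElem_inj_iff hnb).mp h'
          · intro he
            have h' : bs[as.idxOf v1]? = some v2 := by
              rw [he]; exact List.getElem?_idxOf h2
            rw [List.getElem?_eq_getElem (by omega)] at h'
            exact Option.some.inj h'
        simp only [catEqLoopA, catEqLoopB, hk1, hk2, hfc, hfwd,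
          List.contains_eq_mem, h1, h2, decide_true, Bool.not_true, if_true, if_false,
          Bool.false_eq_true, hg1, hg2, Option.getD_some]
        by_cases heq : bs[as.idxOf v1] = v2
        · have he := hiff.mp heq
          rw [if_neg (by simp [he]), if_neg (not_not_intro heq)]
          exact ih as bs hna hnb hlen
        · have hne : as.idxOf v1 ≠ bs.idxOf v2 := fun hc => heq (hiff.mpr hc)
          rw [if_pos (by simpa using hne), if_pos heq]
      · -- v1 seen, v2 new: A's codes differ (old code < size); B's stored partner is an old v2
        have hmem : bs[as.idxOf v1] ∈ bs := List.getElem_mem _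
        have hne2 : bs[as.idxOf v1] ≠ v2 := fun hc => h2 (hc ▸ hmem)
        simp [catEqLoopA, catEqLoopB, hk1, hk2, hfc, hfwd, List.contains_eq_mem,
          h1, h2, hg1, hne2]
        exact fun hc => absurd hc (by omega)
    · by_cases h2 : v2 ∈ bs
      · -- v1 new, v2 seen: A's new code = size ≠ old code; B finds v2 in seen2
        have hi2 : bs.idxOf v2 < bs.length := List.idxOf_lt_length_of_mem h2
        have hg2 := get?_codesFrom bs 0 v2 h2
        simp [catEqLoopA, catEqLoopB, hk1, hk2, hfc, PySem.Set.contains,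
          List.contains_eq_mem, h1, h2, hg2]
        exact fun hc => absurd hc (by omega)
      · -- both new: both continue, with both states extended in step
        have hstep1 := codesFrom_append_singleton as v1 h1
        have hstep2 := codesFrom_append_singleton bs v2 h2
        have hzip : (as ++ [v1]).zip (bs ++ [v2]) = as.zip bs ++ [(v1, v2)] := by
          rw [List.zip_append hlen]; rfl
        have hfins : (PySem.Dict.mk (as.zip bs)).insert v1 v2 =
            PySem.Dict.mk ((as ++ [v1]).zip (bs ++ [v2])) := by
          apply PySem.Dict.ext
          rw [PySem.Dict.items_insert_of_not_contains _ _ (by simp [hfc, h1])]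
          simp [hzip]
        have hadd : PySem.Set.add bs v2 = bs ++ [v2] := PySem.Set.add_of_not_mem h2
        have hrec := ih (as ++ [v1]) (bs ++ [v2])
          (by simp [List.nodup_append, hna]
              exact fun a ha hav => h1 (hav ▸ ha))
          (by simp [List.nodup_append, hnb]
              exact fun a ha hav => h2 (hav ▸ ha))
          (by simp [hlen])
        simp only [catEqLoopA, catEqLoopB, hk1, hk2, hfc, PySem.Set.contains,
          List.contains_eq_mem, h1, h2, decide_false, Bool.not_false, if_true]
        rw [if_neg (by simp [hlen]), hstep1, hstep2, hfins, hadd]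
        exact hrec

-- ===== VERDICT (by name: the statement is the Claim_ definition above) =====
theorem cat_eq_spec : Claim_equal_cat_eq := by
  intro arr1 arr2 _
  unfold Spec_cat_eq cat_eq cat_eq_alt
  have h := loopA_eq_loopB (arr1.zip arr2) [] [] List.nodup_nil List.nodup_nil rfl
  simpa [codesFrom, PySem.Set.empty] using h
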